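-- pv_equiv track=rewrite | github.com/Romio1310/SkillScope | backend/server.py | generate_gap_analysis
-- ===== SOURCE A (Python) =====
-- def classify_skill_priority(skill: str, category: str) -> str:
--     high_priority_categories = ["core", "ml"]
--     if category in high_priority_categories:
--         return "high"
--     medium_priority_categories = ["frameworks", "methodologies", "concepts"]
--     if category in medium_priority_categories:
--         return "medium"
--     return "low"
--
-- def generate_gap_analysis(skill_result: dict) -> list:
--     gaps = []
--     for skill, category in skill_result["missing"].items():
--         priority = classify_skill_priority(skill, category)
--         gaps.append({
--             "skill": skill,
--             "category": category,
--             "priority": priority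
--         })
--     gaps.sort(key=lambda x: {"high": 0, "medium": 1, "low": 2}[x["priority"]])
--     return gaps
-- ===== SOURCE B (Python) =====
-- _PRIORITY = {
--     "core": "high", "ml": "high",
--     "frameworks": "medium", "methodologies": "medium", "concepts": "medium",
-- }
--
-- def generate_gap_analysis(skill_result: dict) -> list:
--     high, medium, low = [], [], []
--     bucket = {"high": high, "medium": medium, "low": low}
--     for skill, category in skill_result["missing"].items():
--         priority = _PRIORITY.get(category, "low")
--         bucket[priority].append({
--             "skill": skill,
--             "category": category,
--             "priority": priority
--         })
--     return high + medium + low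
-- ===== Notes on version B (the rewrite author's own statement) =====
-- stated objective: alternative
-- what changed: Replaced the build-then-stable-sort (comparison sort keyed by a priority-rank dict) by a single pass that classifies each missing skill via one category-to-priority table and appends it to one of three buckets (high/medium/low), returning their concatenation; within-bucket encounter order equals the stable sort's order.
import Mathlib
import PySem

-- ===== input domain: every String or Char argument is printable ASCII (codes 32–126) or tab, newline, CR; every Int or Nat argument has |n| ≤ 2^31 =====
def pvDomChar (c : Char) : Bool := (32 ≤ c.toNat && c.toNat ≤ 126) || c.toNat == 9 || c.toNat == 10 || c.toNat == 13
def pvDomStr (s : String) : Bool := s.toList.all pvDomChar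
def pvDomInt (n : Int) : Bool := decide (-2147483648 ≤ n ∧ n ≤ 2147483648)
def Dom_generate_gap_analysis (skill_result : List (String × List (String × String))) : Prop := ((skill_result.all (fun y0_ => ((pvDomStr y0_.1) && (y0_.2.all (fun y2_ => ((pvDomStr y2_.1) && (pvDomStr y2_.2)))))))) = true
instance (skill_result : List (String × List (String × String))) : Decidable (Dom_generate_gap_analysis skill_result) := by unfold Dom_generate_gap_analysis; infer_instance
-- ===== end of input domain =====

-- B replaces A's build-then-stable-sort by a single classifying pass into three buckets
-- (high/medium/low) concatenated in priority order (objective: alternative decomposition).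
-- A sorts its local list in place before returning it; no argument is mutated.

-- ===== PORT A =====
def classify_skill_priority (skill : String) (category : String) : String :=
  if category ∈ ["core", "ml"] then "high"
  else if category ∈ ["frameworks", "methodologies", "concepts"] then "medium"
  else "low"

-- {"high": 0, "medium": 1, "low": 2}[p]; total form: p is always one of the three keys here
def prioRankA (p : String) : Int :=
  PySem.Dict.getD (PySem.Dict.ofList [("high", (0 : Int)), ("medium", 1), ("low", 2)]) p 2

-- the sort key 'lambda x: {...}[x["priority"]]'; total form of x["priority"]: "priority" is always a key
def keyA (x : List (String × String)) : Int :=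
  prioRankA (PySem.Dict.getD (PySem.Dict.ofList x) "priority" "low")

def generate_gap_analysis (skill_result : List (String × List (String × String))) : List (List (String × String)) :=
  match PySem.Dict.get? (PySem.Dict.ofList skill_result) "missing" with
  | none => []  -- Python raises KeyError here; excluded by Pre_
  | some missing =>
    let gaps := ((PySem.Dict.ofList missing).items).foldl
      (fun gaps sc =>
        let priority := classify_skill_priority sc.1 sc.2
        gaps ++ [[("skill", sc.1), ("category", sc.2), ("priority", priority)]]) []
    PySem.List.sorted gaps keyA false

-- ===== PORT B =====
-- _PRIORITY.get(category, "low")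
def prioOf (category : String) : String :=
  PySem.Dict.getD (PySem.Dict.ofList [("core", "high"), ("ml", "high"), ("frameworks", "medium"), ("methodologies", "medium"), ("concepts", "medium")]) category "low"

def generate_gap_analysis_alt (skill_result : List (String × List (String × String))) : List (List (String × String)) :=
  match PySem.Dict.get? (PySem.Dict.ofList skill_result) "missing" with
  | none => []  -- Python raises KeyError here; excluded by Pre_
  | some missing =>
    let bs := ((PySem.Dict.ofList missing).items).foldl
      (fun (bs : List (List (String × String)) × List (List (String × String)) × List (List (String × String))) sc =>
        let p := prioOf sc.2
        let g := [("skill", sc.1), ("category", sc.2), ("priority", p)]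
        if p = "high" then (bs.1 ++ [g], bs.2.1, bs.2.2)
        else if p = "medium" then (bs.1, bs.2.1 ++ [g], bs.2.2)
        else (bs.1, bs.2.1, bs.2.2 ++ [g]))
      ([], [], [])
    bs.1 ++ bs.2.1 ++ bs.2.2

-- ===== PRECONDITION & SPEC =====
-- Pre_ excludes exactly the inputs where skill_result has no "missing" key: there A raises KeyError (and B does too).
def Pre_generate_gap_analysis (skill_result : List (String × List (String × String))) : Prop :=
  "missing" ∈ skill_result.map Prod.fst
instance (skill_result : List (String × List (String × String))) : Decidable (Pre_generate_gap_analysis skill_result) := by unfold Pre_generate_gap_analysis; infer_instance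
def pvWitness_generate_gap_analysis : (List (String × List (String × String))) := ([("missing", [("python", "core"), ("sql", "tools")])])

def Spec_generate_gap_analysis (skill_result : List (String × List (String × String))) (out : List (List (String × String))) : Prop := out = generate_gap_analysis_alt skill_result
instance (skill_result : List (String × List (String × String))) (out : List (List (String × String))) : Decidable (Spec_generate_gap_analysis skill_result out) := by unfold Spec_generate_gap_analysis; infer_instance

-- ===== CLAIM (what is proved, stated in full; the proofs are below) =====
def Claim_equal_generate_gap_analysis : Prop := ∀ (skill_result : List (String × List (String × String))), Dom_generate_gap_analysis skill_result → Pre_generate_gap_analysis skill_result → Spec_generate_gap_analysis skill_result (generate_gap_analysis skill_result)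

-- ===== LEMMAS AND PROOFS =====

-- the gap dict A builds for one (skill, category) item
def gapA (sc : String × String) : List (String × String) :=
  [("skill", sc.1), ("category", sc.2), ("priority", classify_skill_priority sc.1 sc.2)]

theorem keyA_gap (s c p : String) :
    keyA [("skill", s), ("category", c), ("priority", p)] = prioRankA p := rfl

theorem classify_eq_prioOf (s c : String) : classify_skill_priority s c = prioOf c := by
  by_cases h1 : c = "core"; · subst h1; rfl
  by_cases h2 : c = "ml"; · subst h2; rfl
  by_cases h3 : c = "frameworks"; · subst h3; rfl
  by_cases h4 : c = "methodologies"; · subst h4; rfl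
  by_cases h5 : c = "concepts"; · subst h5; rfl
  have hd : PySem.Dict.ofList [("core", "high"), ("ml", "high"), ("frameworks", "medium"), ("methodologies", "medium"), ("concepts", "medium")] = PySem.Dict.mk [("core", "high"), ("ml", "high"), ("frameworks", "medium"), ("methodologies", "medium"), ("concepts", "medium")] := by decide
  have b1 : ("core" == c) = false := beq_eq_false_iff_ne.mpr (fun e => h1 e.symm)
  have b2 : ("ml" == c) = false := beq_eq_false_iff_ne.mpr (fun e => h2 e.symm)
  have b3 : ("frameworks" == c) = false := beq_eq_false_iff_ne.mpr (fun e => h3 e.symm)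
  have b4 : ("methodologies" == c) = false := beq_eq_false_iff_ne.mpr (fun e => h4 e.symm)
  have b5 : ("concepts" == c) = false := beq_eq_false_iff_ne.mpr (fun e => h5 e.symm)
  simp [classify_skill_priority, prioOf, hd, h1, h2, h3, h4, h5,
    PySem.Dict.getD, b1, b2, b3, b4, b5, PySem.Dict.get?]

theorem classify_cases (s c : String) :
    classify_skill_priority s c = "high" ∨ classify_skill_priority s c = "medium" ∨
      classify_skill_priority s c = "low" := by
  unfold classify_skill_priority; split_ifs <;> simp

theorem insertBy_skip {α : Type} (before : α → α → Bool) (x : α) (ys zs : List α)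
    (h : ∀ y ∈ ys, before x y = false) :
    PySem.List.insertBy before x (ys ++ zs) = ys ++ PySem.List.insertBy before x zs := by
  induction ys with
  | nil => rfl
  | cons y t ih =>
      simp only [List.cons_append, PySem.List.insertBy, h y (by simp)]
      simp only [Bool.false_eq_true, if_false, List.cons.injEq, true_and]
      exact ih (fun z hz => h z (by simp [hz]))

theorem insertBy_all_before {α : Type} (before : α → α → Bool) (x : α) (zs : List α)
    (h : ∀ y ∈ zs, before x y = true) :
    PySem.List.insertBy before x zs = x :: zs := by
  cases zs with
  | nil => rfl
  | cons z t => simp [PySem.List.insertBy, h z (by simp)]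

-- three-valued stable insertion sort = three filters, by the bucket invariant
theorem foldl_insertBy_tri {α : Type} (key : α → Int) (gs f0 f1 f2 : List α)
    (h0 : ∀ y ∈ f0, key y = 0) (h1 : ∀ y ∈ f1, key y = 1) (h2 : ∀ y ∈ f2, key y = 2)
    (hg : ∀ y ∈ gs, key y = 0 ∨ key y = 1 ∨ key y = 2) :
    gs.foldl (fun acc x => PySem.List.insertBy (fun a b => decide (key a < key b)) x acc)
        (f0 ++ f1 ++ f2)
      = (f0 ++ gs.filter (fun x => key x == 0)) ++ (f1 ++ gs.filter (fun x => key x == 1))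
          ++ (f2 ++ gs.filter (fun x => key x == 2)) := by
  induction gs generalizing f0 f1 f2 with
  | nil => simp
  | cons x gs ih =>
      rcases hg x (by simp) with hx | hx | hx
      · have hins : PySem.List.insertBy (fun a b => decide (key a < key b)) x (f0 ++ f1 ++ f2)
            = (f0 ++ [x]) ++ f1 ++ f2 := by
          rw [List.append_assoc, insertBy_skip _ _ f0 (f1 ++ f2)
            (fun y hy => by simp [h0 y hy, hx]),
            insertBy_all_before _ _ (f1 ++ f2) (fun y hy => by
              rcases List.mem_append.mp hy with h | h
              · simp [h1 y h, hx]
              · simp [h2 y h, hx])]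
          simp
        rw [List.foldl_cons, hins,
          ih (f0 ++ [x]) f1 f2
            (fun y hy => by rcases List.mem_append.mp hy with h | h
                            · exact h0 y h
                            · simp_all)
            h1 h2 (fun y hy => hg y (by simp [hy]))]
        simp [hx]
      · have hins : PySem.List.insertBy (fun a b => decide (key a < key b)) x (f0 ++ f1 ++ f2)
            = f0 ++ (f1 ++ [x]) ++ f2 := by
          rw [insertBy_skip _ _ (f0 ++ f1) f2 (fun y hy => by
              rcases List.mem_append.mp hy with h | h
              · simp [h0 y h, hx]
              · simp [h1 y h, hx]),
            insertBy_all_before _ _ f2 (fun y hy => by simp [h2 y hy, hx])]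
          simp
        rw [List.foldl_cons, hins,
          ih f0 (f1 ++ [x]) f2 h0
            (fun y hy => by rcases List.mem_append.mp hy with h | h
                            · exact h1 y h
                            · simp_all)
            h2 (fun y hy => hg y (by simp [hy]))]
        simp [hx]
      · have hins : PySem.List.insertBy (fun a b => decide (key a < key b)) x (f0 ++ f1 ++ f2)
            = f0 ++ f1 ++ (f2 ++ [x]) := by
          have e2 : PySem.List.insertBy (fun a b => decide (key a < key b)) x f2
              = f2 ++ [x] := by
            simpa using insertBy_skip (fun a b => decide (key a < key b)) x f2 []
              (fun y hy => by simp [h2 y hy, hx])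
          rw [List.append_assoc,
            insertBy_skip _ _ f0 (f1 ++ f2) (fun y hy => by simp [h0 y hy, hx]),
            insertBy_skip _ _ f1 f2 (fun y hy => by simp [h1 y hy, hx]), e2]
          simp
        rw [List.foldl_cons, hins,
          ih f0 f1 (f2 ++ [x]) h0 h1
            (fun y hy => by rcases List.mem_append.mp hy with h | h
                            · exact h2 y h
                            · simp_all)
            (fun y hy => hg y (by simp [hy]))]
        simp [hx]

theorem keyA_gapA_cases (sc : String × String) :
    keyA (gapA sc) = 0 ∨ keyA (gapA sc) = 1 ∨ keyA (gapA sc) = 2 := by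
  unfold gapA
  rw [keyA_gap]
  rcases classify_cases sc.1 sc.2 with h | h | h <;> rw [h] <;> simp [prioRankA] <;> decide

theorem rank_high : prioRankA "high" = 0 := by decide
theorem rank_medium : prioRankA "medium" = 1 := by decide
theorem rank_low : prioRankA "low" = 2 := by decide

-- B's bucket fold, characterised by the same three filters
theorem foldl_buckets (items : List (String × String))
    (a b c : List (List (String × String))) :
    items.foldl
      (fun (bs : List (List (String × String)) × List (List (String × String)) × List (List (String × String))) sc =>
        let p := prioOf sc.2
        let g := [("skill", sc.1), ("category", sc.2), ("priority", p)]
        if p = "high" then (bs.1 ++ [g], bs.2.1, bs.2.2)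
        else if p = "medium" then (bs.1, bs.2.1 ++ [g], bs.2.2)
        else (bs.1, bs.2.1, bs.2.2 ++ [g]))
      (a, b, c)
      = (a ++ (items.map gapA).filter (fun g => keyA g == 0),
         b ++ (items.map gapA).filter (fun g => keyA g == 1),
         c ++ (items.map gapA).filter (fun g => keyA g == 2)) := by
  induction items generalizing a b c with
  | nil => simp
  | cons sc items ih =>
      have hp : prioOf sc.2 = classify_skill_priority sc.1 sc.2 :=
        (classify_eq_prioOf sc.1 sc.2).symm
      rcases classify_cases sc.1 sc.2 with h | h | h <;>
        simp [hp, h, ih, gapA, keyA_gap, rank_high, rank_medium, rank_low]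

theorem gaps_fold_eq_map (items : List (String × String)) :
    items.foldl
      (fun gaps sc =>
        let priority := classify_skill_priority sc.1 sc.2
        gaps ++ [[("skill", sc.1), ("category", sc.2), ("priority", priority)]]) []
      = items.map gapA := by
  simpa using PySem.List.foldl_append_singleton_eq_map gapA items []

-- ===== VERDICT (by name: the statement is the Claim_ definition above) =====
theorem generate_gap_analysis_spec : Claim_equal_generate_gap_analysis := by
  intro skill_result _ _
  unfold Spec_generate_gap_analysis generate_gap_analysis generate_gap_analysis_alt
  cases hm : PySem.Dict.get? (PySem.Dict.ofList skill_result) "missing" with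
  | none => rfl
  | some missing =>
      simp only []
      rw [gaps_fold_eq_map, foldl_buckets]
      rw [PySem.List.sorted_eq_foldl_insertBy]
      have := foldl_insertBy_tri keyA ((PySem.Dict.ofList missing).items.map gapA) [] [] []
        (by simp) (by simp) (by simp)
        (by intro y hy
            rcases List.mem_map.mp hy with ⟨sc, _, rfl⟩
            exact keyA_gapA_cases sc)
      simpa using this
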